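-- pv_equiv track=rewrite | github.com/janneesa/KouluTehtavat | hardware2/raspberry_pi_pico/task2_1.py | find_positive_peaks
-- ===== SOURCE A (Python) =====
-- def find_positive_peaks(signal_data):
--     peaks = []
--     prev_slope = 0
--
--     for i in range(1, len(signal_data)):
--         slope = signal_data[i] - signal_data[i - 1]
--
--         # Check if slope turns from positive to negative
--         if slope < 0 and prev_slope > 0:
--             peaks.append(i - 1)
--
--         prev_slope = slope
--
--     return peaks
-- ===== SOURCE B (Python) =====
-- def find_positive_peaks(signal_data):
--     return [i for i in range(1, len(signal_data) - 1)
--             if signal_data[i] > signal_data[i - 1] and signal_data[i] > signal_data[i + 1]]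
-- ===== Notes on version B (the rewrite author's own statement) =====
-- stated objective: simpler
-- what changed: Replaced the slope/prev_slope state machine with a stateless comprehension that marks index i a peak when signal_data[i] is strictly greater than both neighbours.
import Mathlib
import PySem

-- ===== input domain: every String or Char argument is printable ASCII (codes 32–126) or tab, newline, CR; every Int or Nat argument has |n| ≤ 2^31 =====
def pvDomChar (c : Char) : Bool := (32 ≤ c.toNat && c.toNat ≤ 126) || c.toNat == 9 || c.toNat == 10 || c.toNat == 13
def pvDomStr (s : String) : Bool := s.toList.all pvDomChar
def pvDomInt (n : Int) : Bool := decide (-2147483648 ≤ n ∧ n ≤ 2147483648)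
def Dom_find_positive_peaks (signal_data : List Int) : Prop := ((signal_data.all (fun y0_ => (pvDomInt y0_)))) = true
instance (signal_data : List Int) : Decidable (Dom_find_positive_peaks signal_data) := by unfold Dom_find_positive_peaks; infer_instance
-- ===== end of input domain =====

-- B replaces A's slope/prev-slope state machine by a stateless strict neighbour comparison (objective: simpler).


-- ===== PORT A =====
-- loop body of A: state is (peaks, prev_slope)
def pvStepA (s : List Int) (st : List Int × Int) (i : Int) : List Int × Int :=
  let slope := PySem.List.pyGetD s i 0 - PySem.List.pyGetD s (i - 1) 0
  let peaks := if slope < 0 ∧ st.2 > 0 then st.1 ++ [i - 1] else st.1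
  (peaks, slope)

def find_positive_peaks (signal_data : List Int) : List Int :=
  ((PySem.List.pyRange 1 (signal_data.length : Int) 1).foldl (pvStepA signal_data) ([], 0)).1

-- ===== PORT B =====
-- B's comprehension condition: strict local maximum at index i
def pvPeakB (s : List Int) (i : Int) : Bool :=
  decide (PySem.List.pyGetD s i 0 > PySem.List.pyGetD s (i - 1) 0 ∧
          PySem.List.pyGetD s i 0 > PySem.List.pyGetD s (i + 1) 0)

def find_positive_peaks_alt (signal_data : List Int) : List Int :=
  (PySem.List.pyRange 1 ((signal_data.length : Int) - 1) 1).filter (pvPeakB signal_data)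

-- ===== PRECONDITION & SPEC =====
def Spec_find_positive_peaks (signal_data : List Int) (out : List Int) : Prop := out = find_positive_peaks_alt signal_data
instance (signal_data : List Int) (out : List Int) : Decidable (Spec_find_positive_peaks signal_data out) := by unfold Spec_find_positive_peaks; infer_instance

-- ===== CLAIM (what is proved, stated in full; the proofs are below) =====
def Claim_equal_find_positive_peaks : Prop := ∀ (signal_data : List Int), Dom_find_positive_peaks signal_data → Spec_find_positive_peaks signal_data (find_positive_peaks signal_data)

-- ===== LEMMAS AND PROOFS =====

-- Invariant of A's loop after processing range(1, m): the accumulated peaks list is exactly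
-- B's filter over range(1, m-1), and prev_slope is s[m-1] - s[m-2] (0 if m = 1).
theorem pv_loop_eq (s : List Int) (m : Nat) (hm : 1 ≤ m) :
    (PySem.List.pyRange 1 (m : Int) 1).foldl (pvStepA s) ([], 0)
      = ((PySem.List.pyRange 1 ((m : Int) - 1) 1).filter (pvPeakB s),
         if m = 1 then 0
         else PySem.List.pyGetD s ((m : Int) - 1) 0 - PySem.List.pyGetD s ((m : Int) - 2) 0) := by
  induction m, hm using Nat.le_induction with
  | base =>
      simp [PySem.List.pyRange_one_eq_nil]
  | succ m hm ih =>
      have hcast : ((m + 1 : Nat) : Int) = (m : Int) + 1 := by push_cast; ring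
      rw [hcast, PySem.List.pyRange_one_succ_right (by exact_mod_cast hm), List.foldl_append,
        ih, List.foldl_cons, List.foldl_nil]
      rcases Nat.eq_or_lt_of_le hm with h1 | h2
      · -- m = 1: prev_slope is 0, no append; both filter ranges are empty
        subst h1
        simp [pvStepA, PySem.List.pyRange_one_eq_nil]
      · -- m ≥ 2
        have hm2 : (2 : Int) ≤ (m : Int) := by exact_mod_cast h2
        have hne : m ≠ 1 := by omega
        have hsplit : PySem.List.pyRange 1 ((m : Int) + 1 - 1) 1
            = PySem.List.pyRange 1 ((m : Int) - 1) 1 ++ [(m : Int) - 1] := by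
          have : (m : Int) + 1 - 1 = ((m : Int) - 1) + 1 := by ring
          rw [this, PySem.List.pyRange_one_succ_right (by omega)]
        rw [hsplit, List.filter_append]
        simp only [pvStepA, hne, if_false, Prod.mk.injEq]
        have hidx : (m : Int) - 1 - 1 = (m : Int) - 2 := by ring
        have hidx2 : (m : Int) - 1 + 1 = (m : Int) := by ring
        refine ⟨?_, ?_⟩
        · -- peaks component
          by_cases hc : PySem.List.pyGetD s ((m : Int)) 0 - PySem.List.pyGetD s ((m : Int) - 1) 0 < 0
              ∧ PySem.List.pyGetD s ((m : Int) - 1) 0 - PySem.List.pyGetD s ((m : Int) - 2) 0 > 0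
          · have hb : pvPeakB s ((m : Int) - 1) = true := by
              simp only [pvPeakB, hidx, hidx2, decide_eq_true_eq]; omega
            rw [if_pos hc, List.filter_cons, hb, if_pos rfl, List.filter_nil]
          · have hb : pvPeakB s ((m : Int) - 1) = false := by
              simp only [pvPeakB, hidx, hidx2, decide_eq_false_iff_not]; omega
            rw [if_neg hc, List.filter_cons, hb]
            simp
        · -- prev_slope component
          have hne' : m + 1 ≠ 1 := by omega
          rw [if_neg hne']
          have h1 : (m : Int) + 1 - 1 = (m : Int) := by ring
          have h2' : (m : Int) + 1 - 2 = (m : Int) - 1 := by ring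
          rw [h1, h2']

-- ===== VERDICT (by name: the statement is the Claim_ definition above) =====
theorem find_positive_peaks_spec : Claim_equal_find_positive_peaks := by
  intro s _
  unfold Spec_find_positive_peaks find_positive_peaks find_positive_peaks_alt
  rcases Nat.eq_zero_or_pos s.length with h0 | hpos
  · rw [h0]
    simp [PySem.List.pyRange_one_eq_nil]
  · rw [pv_loop_eq s s.length hpos]
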